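-- pv_equiv track=rewrite | github.com/Nezno6/daily-python | word_order.py | word_order
-- ===== SOURCE A (Python) =====
-- def format_word_order(dictionary: dict):
--     return f'{len(dictionary)}\n{" ".join(str(value) for value in dictionary.values())}'
--
-- def word_order(words: list):
--     answer: dict = dict()
--     for word in words:
--         if word in answer:
--             answer[word] += 1
--         else:
--             answer[word] = 1
--     return format_word_order(answer)
-- ===== SOURCE B (Python) =====
-- def word_order(words: list):
--     pairs = []
--     ws = words
--     while ws:
--         w = ws[0]
--         pairs.append((w, ws.count(w)))
--         ws = [x for x in ws[1:] if x != w]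
--     return f'{len(pairs)}\n{" ".join(str(c) for _, c in pairs)}'
-- ===== Notes on version B (the rewrite author's own statement) =====
-- stated objective: alternative
-- what changed: Replaces A's single-pass dict accumulation with a shrinking-worklist algorithm: repeatedly take the head word, count its occurrences with ws.count, filter all of them out of the remaining list, and continue on the remainder; no dict or membership structure is maintained.
import Mathlib
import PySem

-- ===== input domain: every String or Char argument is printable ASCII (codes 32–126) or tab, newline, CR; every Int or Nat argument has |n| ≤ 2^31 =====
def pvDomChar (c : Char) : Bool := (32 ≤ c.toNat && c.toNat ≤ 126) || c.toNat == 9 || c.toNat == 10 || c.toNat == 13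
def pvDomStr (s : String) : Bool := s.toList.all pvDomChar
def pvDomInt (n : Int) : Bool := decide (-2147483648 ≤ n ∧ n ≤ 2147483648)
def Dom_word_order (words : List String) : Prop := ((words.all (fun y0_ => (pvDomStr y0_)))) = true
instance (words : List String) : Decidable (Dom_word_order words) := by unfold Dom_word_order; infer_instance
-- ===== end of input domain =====

-- B replaces A's single-pass dict accumulation by a shrinking-worklist loop: take the head
-- word, count its occurrences, filter them out of the rest and continue; same result.

-- ===== PORT A =====
def format_word_order (dictionary : PySem.Dict String Int) : String :=
  PySem.Int.toStr (dictionary.size : Int) ++ "\n" ++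
    PySem.Str.join " " (dictionary.values.map PySem.Int.toStr)

def word_order (words : List String) : String :=
  -- in the 'then' branch the key is present, so answer[word] is answer.getD word 0
  let answer := words.foldl
    (fun d word => if d.contains word then d.insert word (d.getD word 0 + 1)
                   else d.insert word 1) PySem.Dict.empty
  format_word_order answer

-- ===== PORT B =====
-- B's while loop over the shrinking worklist ws, as recursion on that worklist
-- (pairs.append((w, ws.count(w))); ws = [x for x in ws[1:] if x != w])
def wordTally : List String → List (String × Int)
  | [] => []
  | w :: rest =>
      (w, (PySem.List.count (w :: rest) w : Int)) :: wordTally (rest.filter (fun x => x ≠ w))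
termination_by ws => ws.length
decreasing_by
  simp only [List.length_cons, List.length_unattach]
  exact Nat.lt_succ_of_le (le_trans (List.length_filter_le _ _) (by simp))

def word_order_alt (words : List String) : String :=
  let pairs := wordTally words
  PySem.Int.toStr (pairs.length : Int) ++ "\n" ++
    PySem.Str.join " " (pairs.map (fun p => PySem.Int.toStr p.2))

-- ===== PRECONDITION & SPEC =====
def Spec_word_order (words : List String) (out : String) : Prop := out = word_order_alt words
instance (words : List String) (out : String) : Decidable (Spec_word_order words out) := by unfold Spec_word_order; infer_instance

-- ===== CLAIM (what is proved, stated in full; the proofs are below) =====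
def Claim_equal_word_order : Prop := ∀ (words : List String), Dom_word_order words → Spec_word_order words (word_order words)

-- ===== LEMMAS AND PROOFS =====

-- A's loop body is the counter step: when the key is absent, getD is 0
theorem wordorder_funA :
    (fun (d : PySem.Dict String Int) word =>
      if d.contains word then d.insert word (d.getD word 0 + 1) else d.insert word 1)
    = fun d word => d.insert word (d.getD word 0 + 1) := by
  funext d w
  by_cases h : d.contains w = true
  · simp [h]
  · rw [if_neg h, PySem.Dict.getD_of_not_contains]
    · norm_num
    · simpa using h

-- deduplication commutes with filtering
theorem ofList_filter (p : String → Bool) (xs : List String) :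
    PySem.Set.ofList (xs.filter p) = (PySem.Set.ofList xs).filter p := by
  induction xs using List.reverseRecOn with
  | nil => rfl
  | append_singleton xs x ih =>
    rw [List.filter_append, PySem.Set.ofList_append_singleton, PySem.Set.add_eq_ite]
    by_cases hp : p x = true
    · simp only [List.filter_singleton, hp, cond_true]
      rw [PySem.Set.ofList_append_singleton, ih, PySem.Set.add_eq_ite]
      by_cases hm : x ∈ PySem.Set.ofList xs
      · have hmf : x ∈ (PySem.Set.ofList xs).filter p := List.mem_filter.mpr ⟨hm, hp⟩
        rw [if_pos hm, if_pos hmf]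
      · have hmf : x ∉ (PySem.Set.ofList xs).filter p := fun h => hm (List.mem_filter.mp h).1
        rw [if_neg hm, if_neg hmf, List.filter_append, List.filter_singleton]
        simp only [hp, cond_true]
    · simp only [List.filter_singleton, hp, cond_false, List.append_nil]
      rw [ih]
      by_cases hm : x ∈ PySem.Set.ofList xs
      · rw [if_pos hm]
      · rw [if_neg hm, List.filter_append, List.filter_singleton]
        simp only [hp, cond_false, List.append_nil]

-- deduplicating after removing every w = discarding w from the deduplicated list
theorem ofList_filter_ne (xs : List String) (w : String) :
    PySem.Set.ofList (xs.filter (fun x => x ≠ w))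
      = PySem.Set.discard (PySem.Set.ofList xs) w := by
  rw [show (fun (x : String) => decide (x ≠ w)) = (fun y => !(y == w)) from
        funext (fun y => by by_cases h : y = w <;> simp [h]), ofList_filter]
  simp [PySem.Set.discard]

-- B's recursion computes exactly the ordered (word, count) pairs of the counter
theorem wordTally_eq_aux (n : Nat) : ∀ (ws : List String), ws.length ≤ n →
    wordTally ws = (PySem.Set.ofList ws).map (fun k => (k, (ws.count k : Int))) := by
  induction n with
  | zero =>
    intro ws h
    have : ws = [] := List.eq_nil_of_length_eq_zero (Nat.le_zero.mp h)
    subst this; simp [wordTally]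
  | succ n ih =>
    intro ws h
    match ws with
    | [] => simp [wordTally]
    | w :: rest =>
      rw [wordTally]
      have hlen : (rest.filter (fun x => decide (x ≠ w))).length ≤ n :=
        le_trans (List.length_filter_le _ _) (by simpa using Nat.le_of_succ_le_succ h)
      rw [ih _ hlen, ofList_filter_ne, PySem.Set.ofList_cons, List.map_cons]
      refine congrArg₂ _ (by simp [PySem.List.count_eq]) ?_
      refine List.map_congr_left (fun k hk => ?_)
      have hne : k ≠ w := ((PySem.Set.mem_discard _ _ _).mp hk).2
      simp [List.count_filter, hne, Ne.symm hne]

theorem wordTally_eq (ws : List String) :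
    wordTally ws = (PySem.Set.ofList ws).map (fun k => (k, (ws.count k : Int))) :=
  wordTally_eq_aux ws.length ws le_rfl

-- ===== VERDICT (by name: the statement is the Claim_ definition above) =====
theorem word_order_spec : Claim_equal_word_order := by
  intro words _
  show word_order words = word_order_alt words
  unfold word_order word_order_alt format_word_order
  rw [wordorder_funA, PySem.Dict.foldl_insert_getD_add_one_eq_counter, wordTally_eq]
  simp only [PySem.Dict.size, PySem.Dict.values, PySem.Dict.items_counter, List.length_map,
    List.map_map]
  rfl
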